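-- pv_equiv track=rewrite | github.com/isudox/nerd-algo | python-algo/misc/grid.py | count
-- ===== SOURCE A (Python) =====
-- def count(m: int, n: int) -> int:
--     dp0 = [[0] * n for _ in range(m)]
--     dp1 = [[0] * n for _ in range(m)]
--     dp0[0][0] = 1
--     dp1[0][0] = 0
--     for i in range(m):
--         for j in range(n):
--             for r in range(i):
--                 dp0[i][j] += dp1[r][j]
--                 dp1[i][j] += dp0[r][j]
--             for c in range(j):
--                 dp0[i][j] += dp1[i][c]
--                 dp1[i][j] += dp0[i][c]
--     return dp1[-1][-1]
-- ===== SOURCE B (Python) =====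
-- def count(m: int, n: int) -> int:
--     # One row-major pass maintaining running column sums (over rows above)
--     # and running row sums (over cells to the left), O(m*n) total.
--     col0 = [0] * n
--     col1 = [0] * n
--     for i in range(m):
--         row0 = 0
--         row1 = 0
--         for j in range(n):
--             a = (1 if i == 0 and j == 0 else 0) + col1[j] + row1
--             b = col0[j] + row0
--             row0 += a
--             row1 += b
--             col0[j] += a
--             col1[j] += b
--     return b
-- ===== Notes on version B (the rewrite author's own statement) =====
-- stated objective: faster
-- what changed: Replaces the per-cell rescans of the whole column above and row to the left by running column-sum arrays and row accumulators updated once per cell, turning O(m*n*(m+n)) into O(m*n).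
import Mathlib
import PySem

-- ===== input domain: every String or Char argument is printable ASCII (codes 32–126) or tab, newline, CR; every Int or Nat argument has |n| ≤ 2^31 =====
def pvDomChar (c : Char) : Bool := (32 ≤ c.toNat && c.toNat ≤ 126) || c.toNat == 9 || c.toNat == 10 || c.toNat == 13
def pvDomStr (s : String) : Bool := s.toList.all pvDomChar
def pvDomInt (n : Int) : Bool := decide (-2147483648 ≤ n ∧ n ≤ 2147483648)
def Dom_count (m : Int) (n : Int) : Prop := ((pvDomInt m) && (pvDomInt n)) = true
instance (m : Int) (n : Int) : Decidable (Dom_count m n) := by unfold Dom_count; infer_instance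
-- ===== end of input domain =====

-- B maintains running column/row prefix sums instead of rescanning the column above and the
-- row to the left for every cell (measured faster in a timing run); equal return values
-- proved on Pre_count (m ≥ 1 and n ≥ 1, exactly where A returns instead of raising IndexError).

-- ===== PORT A =====
-- dp0/dp1 are the Python lists of lists; reads/writes of A happen at the same
-- indices with the same values (all indices are in range on Pre_count).
def get2 (g : List (List Int)) (i j : Nat) : Int := (g.getD i []).getD j 0

def set2 (g : List (List Int)) (i j : Nat) (v : Int) : List (List Int) :=
  g.set i ((g.getD i []).set j v)

-- body of `for r in range(i)`: dp0[i][j] += dp1[r][j]; dp1[i][j] += dp0[r][j]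
def rStepA (i j : Nat) (st : List (List Int) × List (List Int)) (r : Nat) :
    List (List Int) × List (List Int) :=
  let g0 := set2 st.1 i j (get2 st.1 i j + get2 st.2 r j)
  let g1 := set2 st.2 i j (get2 st.2 i j + get2 g0 r j)
  (g0, g1)

-- body of `for c in range(j)`: dp0[i][j] += dp1[i][c]; dp1[i][j] += dp0[i][c]
def cStepA (i j : Nat) (st : List (List Int) × List (List Int)) (c : Nat) :
    List (List Int) × List (List Int) :=
  let g0 := set2 st.1 i j (get2 st.1 i j + get2 st.2 i c)
  let g1 := set2 st.2 i j (get2 st.2 i j + get2 g0 i c)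
  (g0, g1)

-- the body of the `for j in range(n)` loop for one cell (i, j)
def cellA (i j : Nat) (st : List (List Int) × List (List Int)) :
    List (List Int) × List (List Int) :=
  (List.range j).foldl (cStepA i j) ((List.range i).foldl (rStepA i j) st)

def count (m : Int) (n : Int) : Int :=
  let M := m.toNat
  let N := n.toNat
  let dp0 := set2 (List.replicate M (List.replicate N 0)) 0 0 1   -- dp0[0][0] = 1
  let dp1 := set2 (List.replicate M (List.replicate N 0)) 0 0 0   -- dp1[0][0] = 0
  let fin := (List.range M).foldl
    (fun st i => (List.range N).foldl (fun st j => cellA i j st) st) (dp0, dp1)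
  get2 fin.2 (M - 1) (N - 1)   -- dp1[-1][-1]

-- ===== PORT B =====
-- col0/col1 are the Python lists `col0`/`col1`; inner-loop state: (col0, col1, row0, row1, b).
-- Python's `b` is unassigned before the first cell; the port starts it at 0, which is only
-- returned on inputs outside Pre_count (where Python B raises UnboundLocalError).
def cellB (i : Nat) (st : List Int × List Int × Int × Int × Int) (j : Nat) :
    List Int × List Int × Int × Int × Int :=
  let col0 := st.1
  let col1 := st.2.1
  let row0 := st.2.2.1
  let row1 := st.2.2.2.1
  let a := (if i = 0 ∧ j = 0 then (1 : Int) else 0) + col1.getD j 0 + row1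
  let b := col0.getD j 0 + row0
  (col0.set j (col0.getD j 0 + a), col1.set j (col1.getD j 0 + b), row0 + a, row1 + b, b)

def rowB (n : Int) (st : List Int × List Int × Int) (i : Nat) :
    List Int × List Int × Int :=
  let fin := (List.range n.toNat).foldl (cellB i) (st.1, st.2.1, 0, 0, st.2.2)
  (fin.1, fin.2.1, fin.2.2.2.2)

def count_alt (m : Int) (n : Int) : Int :=
  let fin := (List.range m.toNat).foldl (rowB n)
    (List.replicate n.toNat 0, List.replicate n.toNat 0, 0)
  fin.2.2

-- ===== PRECONDITION & SPEC =====
-- Pre_count: exactly the inputs where A returns normally; for m ≤ 0 or n ≤ 0 the Python A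
-- raises IndexError (dp0[0][0] on an empty matrix, or dp1[-1][-1]).
def Pre_count (m : Int) (n : Int) : Prop := 1 ≤ m ∧ 1 ≤ n
instance (m : Int) (n : Int) : Decidable (Pre_count m n) := by unfold Pre_count; infer_instance
def pvWitness_count : Int × Int := (3, 4)

def Spec_count (m : Int) (n : Int) (out : Int) : Prop := out = count_alt m n
instance (m : Int) (n : Int) (out : Int) : Decidable (Spec_count m n out) := by unfold Spec_count; infer_instance

-- ===== CLAIM (what is proved, stated in full; the proofs are below) =====
def Claim_equal_count : Prop := ∀ (m : Int) (n : Int), Dom_count m n → Pre_count m n → Spec_count m n (count m n)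

-- ===== LEMMAS AND PROOFS =====

-- function-level model of A's matrices used only in the proofs below
def updA (g : Nat → Nat → Int) (i j : Nat) (v : Int) : Nat → Nat → Int :=
  fun i' j' => if i' = i ∧ j' = j then v else g i' j'

def rStepF (i j : Nat) (st : (Nat → Nat → Int) × (Nat → Nat → Int)) (r : Nat) :
    (Nat → Nat → Int) × (Nat → Nat → Int) :=
  let g0 := updA st.1 i j (st.1 i j + st.2 r j)
  let g1 := updA st.2 i j (st.2 i j + g0 r j)
  (g0, g1)

def cStepF (i j : Nat) (st : (Nat → Nat → Int) × (Nat → Nat → Int)) (c : Nat) :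
    (Nat → Nat → Int) × (Nat → Nat → Int) :=
  let g0 := updA st.1 i j (st.1 i j + st.2 i c)
  let g1 := updA st.2 i j (st.2 i j + g0 i c)
  (g0, g1)

def cellF (i j : Nat) (st : (Nat → Nat → Int) × (Nat → Nat → Int)) :
    (Nat → Nat → Int) × (Nat → Nat → Int) :=
  (List.range j).foldl (cStepF i j) ((List.range i).foldl (rStepF i j) st)

-- the list matrix holding f on an M × N grid
def mat (M N : Nat) (f : Nat → Nat → Int) : List (List Int) :=
  (List.range M).map (fun r => (List.range N).map (f r))

lemma get2_mat (M N : Nat) (f : Nat → Nat → Int) (r c : Nat) (hr : r < M) (hc : c < N) :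
    get2 (mat M N f) r c = f r c := by
  unfold get2 mat
  simp [List.getD_eq_getElem?_getD, List.getElem?_map, List.getElem?_range hr,
    List.getElem?_range hc]

lemma set2_mat (M N : Nat) (f : Nat → Nat → Int) (i j : Nat) (hi : i < M) (_hj : j < N) (v : Int) :
    set2 (mat M N f) i j v = mat M N (updA f i j v) := by
  unfold set2 mat
  have hrow : ((List.range M).map (fun r => (List.range N).map (f r))).getD i []
      = (List.range N).map (f i) := by
    simp [List.getD_eq_getElem?_getD, List.getElem?_map, List.getElem?_range hi]
  rw [hrow]
  apply List.ext_getElem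
  · simp
  · intro t h1 h2
    rw [List.getElem_set]
    simp only [List.getElem_map, List.getElem_range,
      List.length_map, List.length_range] at h1 h2 ⊢
    split_ifs with ht
    · subst ht
      apply List.ext_getElem
      · simp
      · intro c c1 c2
        rw [List.getElem_set]
        simp only [List.getElem_map, List.getElem_range,
          List.length_map, List.length_range] at c1 c2 ⊢
        unfold updA
        split_ifs with hc h2' h3' <;> try rfl
        · omega
        · omega
    · apply List.map_congr_left
      intro c _
      unfold updA
      rw [if_neg (by omega)]

lemma mat_congr (M N : Nat) (f g : Nat → Nat → Int)
    (h : ∀ r c, r < M → c < N → f r c = g r c) : mat M N f = mat M N g := by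
  unfold mat
  apply List.map_congr_left; intro r hr
  apply List.map_congr_left; intro c hc
  exact h r c (List.mem_range.mp hr) (List.mem_range.mp hc)

lemma foldl_hom_mem {α β γ : Type} (f : α → γ) (g1 : α → β → α) (g2 : γ → β → γ)
    (l : List β) (init : α) (H : ∀ a x, x ∈ l → g2 (f a) x = f (g1 a x)) :
    l.foldl g2 (f init) = f (l.foldl g1 init) := by
  induction l generalizing init with
  | nil => rfl
  | cons x t ih =>
    rw [List.foldl_cons, List.foldl_cons, H init x (by simp)]
    exact ih _ (fun a y hy => H a y (by simp [hy]))

def matP (M N : Nat) (st : (Nat → Nat → Int) × (Nat → Nat → Int)) :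
    List (List Int) × List (List Int) := (mat M N st.1, mat M N st.2)

lemma rStepA_sim (M N i j r : Nat) (hi : i < M) (hj : j < N) (hr : r < M)
    (st : (Nat → Nat → Int) × (Nat → Nat → Int)) :
    rStepA i j (matP M N st) r = matP M N (rStepF i j st r) := by
  unfold rStepA rStepF matP
  simp only [get2_mat M N _ _ _ hi hj, get2_mat M N _ _ _ hr hj,
    set2_mat M N _ _ _ hi hj]

lemma cStepA_sim (M N i j c : Nat) (hi : i < M) (hj : j < N) (hc : c < N)
    (st : (Nat → Nat → Int) × (Nat → Nat → Int)) :
    cStepA i j (matP M N st) c = matP M N (cStepF i j st c) := by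
  unfold cStepA cStepF matP
  simp only [get2_mat M N _ _ _ hi hj, get2_mat M N _ _ _ hi hc,
    set2_mat M N _ _ _ hi hj]

lemma cellA_sim (M N i j : Nat) (hi : i < M) (hj : j < N)
    (st : (Nat → Nat → Int) × (Nat → Nat → Int)) :
    cellA i j (matP M N st) = matP M N (cellF i j st) := by
  unfold cellA cellF
  rw [foldl_hom_mem (matP M N) (rStepF i j) (rStepA i j) (List.range i) st
    (fun a x hx => rStepA_sim M N i j x hi hj (by have := List.mem_range.mp hx; omega) a)]
  exact foldl_hom_mem (matP M N) (cStepF i j) (cStepA i j) (List.range j) _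
    (fun a x hx => cStepA_sim M N i j x hi hj (by have := List.mem_range.mp hx; omega) a)


-- the mathematical value of cell (i, j): d i j = (dp0[i][j], dp1[i][j])
def d : Nat → Nat → Int × Int
  | i, j =>
    ((if i = 0 ∧ j = 0 then (1 : Int) else 0)
       + ((List.range i).attach.map (fun r => (d r.1 j).2)).sum
       + ((List.range j).attach.map (fun c => (d i c.1).2)).sum,
     ((List.range i).attach.map (fun r => (d r.1 j).1)).sum
       + ((List.range j).attach.map (fun c => (d i c.1).1)).sum)
termination_by i j => i + j
decreasing_by
  all_goals first
    | (have := List.mem_range.mp r.2; omega)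
    | (have := List.mem_range.mp c.2; omega)

lemma d_fst (i j : Nat) :
    (d i j).1 = (if i = 0 ∧ j = 0 then (1 : Int) else 0)
      + ((List.range i).map (fun r => (d r j).2)).sum
      + ((List.range j).map (fun c => (d i c).2)).sum := by
  rw [d]; simp

lemma d_snd (i j : Nat) :
    (d i j).2 = ((List.range i).map (fun r => (d r j).1)).sum
      + ((List.range j).map (fun c => (d i c).1)).sum := by
  rw [d]; simp


lemma d00 : d 0 0 = (1, 0) := by rw [d]; simp

lemma updA_updA (g : Nat → Nat → Int) (i j : Nat) (v w : Int) :
    updA (updA g i j v) i j w = updA g i j w := by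
  funext r c; by_cases h : r = i ∧ c = j <;> simp [updA, h]

lemma updA_same (g : Nat → Nat → Int) (i j : Nat) (v : Int) : updA g i j v i j = v := by
  simp [updA]

lemma updA_id (g : Nat → Nat → Int) (i j : Nat) : updA g i j (g i j) = g := by
  funext r c
  by_cases h : r = i ∧ c = j
  · obtain ⟨h1, h2⟩ := h; subst h1; subst h2; simp [updA]
  · simp [updA, h]

lemma updA_other (g : Nat → Nat → Int) (i j : Nat) (v : Int) (r c : Nat)
    (h : ¬(r = i ∧ c = j)) : updA g i j v r c = g r c := by
  simp [updA, h]

-- r-loop of A: k passes add the column-above entries one by one at (i, j)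
lemma foldA_r (i j : Nat) (G0 G1 : Nat → Nat → Int) (k : Nat) (hk : k ≤ i) :
    (List.range k).foldl (rStepF i j) (G0, G1)
      = (updA G0 i j (G0 i j + ((List.range k).map (fun r => G1 r j)).sum),
         updA G1 i j (G1 i j + ((List.range k).map (fun r => G0 r j)).sum)) := by
  induction k with
  | zero =>
    simp only [List.range_zero, List.foldl_nil, List.map_nil, List.sum_nil, add_zero]
    rw [updA_id, updA_id]
  | succ k ih =>
    rw [List.range_succ, List.foldl_append, ih (by omega), List.foldl_cons, List.foldl_nil]
    simp only [rStepF, updA_updA, updA_same]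
    rw [updA_other G1 i j _ k j (by omega), updA_other G0 i j _ k j (by omega)]
    rw [List.map_append, List.map_append, List.sum_append, List.sum_append]
    simp only [List.map_cons, List.map_nil, List.sum_cons, List.sum_nil]
    rw [Prod.mk.injEq]
    constructor <;> · congr 1; ring

-- c-loop of A
lemma foldA_c (i j : Nat) (G0 G1 : Nat → Nat → Int) (k : Nat) (hk : k ≤ j) :
    (List.range k).foldl (cStepF i j) (G0, G1)
      = (updA G0 i j (G0 i j + ((List.range k).map (fun c => G1 i c)).sum),
         updA G1 i j (G1 i j + ((List.range k).map (fun c => G0 i c)).sum)) := by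
  induction k with
  | zero =>
    simp only [List.range_zero, List.foldl_nil, List.map_nil, List.sum_nil, add_zero]
    rw [updA_id, updA_id]
  | succ k ih =>
    rw [List.range_succ, List.foldl_append, ih (by omega), List.foldl_cons, List.foldl_nil]
    simp only [cStepF, updA_updA, updA_same]
    rw [updA_other G1 i j _ i k (by omega), updA_other G0 i j _ i k (by omega)]
    rw [List.map_append, List.map_append, List.sum_append, List.sum_append]
    simp only [List.map_cons, List.map_nil, List.sum_cons, List.sum_nil]
    rw [Prod.mk.injEq]
    constructor <;> · congr 1; ring

lemma cellF_eq (i j : Nat) (G0 G1 : Nat → Nat → Int) :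
    cellF i j (G0, G1)
      = (updA G0 i j (G0 i j + ((List.range i).map (fun r => G1 r j)).sum
            + ((List.range j).map (fun c => G1 i c)).sum),
         updA G1 i j (G1 i j + ((List.range i).map (fun r => G0 r j)).sum
            + ((List.range j).map (fun c => G0 i c)).sum)) := by
  unfold cellF
  rw [foldA_r i j G0 G1 i le_rfl, foldA_c i j _ _ j le_rfl]
  rw [updA_updA, updA_updA, updA_same, updA_same]
  have m0 : (List.range j).map (fun c => updA G0 i j (G0 i j + ((List.range i).map (fun r => G1 r j)).sum) i c)
      = (List.range j).map (fun c => G0 i c) := by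
    apply List.map_congr_left; intro c hc
    exact updA_other _ _ _ _ _ _ (by have := List.mem_range.mp hc; omega)
  have m1 : (List.range j).map (fun c => updA G1 i j (G1 i j + ((List.range i).map (fun r => G0 r j)).sum) i c)
      = (List.range j).map (fun c => G1 i c) := by
    apply List.map_congr_left; intro c hc
    exact updA_other _ _ _ _ _ _ (by have := List.mem_range.mp hc; omega)
  rw [m0, m1]

-- state of A's matrices once every cell before (i, j) in row-major order is done
def F0 (N i j : Nat) : Nat → Nat → Int := fun r c =>
  if (r < i ∧ c < N) ∨ (r = i ∧ c < j) ∨ (r = 0 ∧ c = 0) then (d r c).1 else 0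
def F1 (N i j : Nat) : Nat → Nat → Int := fun r c =>
  if (r < i ∧ c < N) ∨ (r = i ∧ c < j) ∨ (r = 0 ∧ c = 0) then (d r c).2 else 0

lemma updF0 (N i j : Nat) : updA (F0 N i j) i j ((d i j).1) = F0 N i (j + 1) := by
  funext r c
  by_cases h : r = i ∧ c = j
  · obtain ⟨h1, h2⟩ := h; subst h1; subst h2
    rw [updA_same]; unfold F0; rw [if_pos (by omega)]
  · rw [updA_other _ _ _ _ _ _ h]; unfold F0; exact if_congr (by omega) rfl rfl

lemma updF1 (N i j : Nat) : updA (F1 N i j) i j ((d i j).2) = F1 N i (j + 1) := by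
  funext r c
  by_cases h : r = i ∧ c = j
  · obtain ⟨h1, h2⟩ := h; subst h1; subst h2
    rw [updA_same]; unfold F1; rw [if_pos (by omega)]
  · rw [updA_other _ _ _ _ _ _ h]; unfold F1; exact if_congr (by omega) rfl rfl

lemma cellF_inv (N i j : Nat) (hj : j < N) :
    cellF i j (F0 N i j, F1 N i j) = (F0 N i (j + 1), F1 N i (j + 1)) := by
  rw [cellF_eq]
  have e00 : F0 N i j i j = if i = 0 ∧ j = 0 then (1 : Int) else 0 := by
    by_cases h : i = 0 ∧ j = 0
    · obtain ⟨h1, h2⟩ := h; subst h1; subst h2; unfold F0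
      rw [if_pos (by omega), if_pos ⟨rfl, rfl⟩]
      have : d 0 0 = (1, 0) := d00
      rw [this]
    · unfold F0; rw [if_neg (by omega), if_neg h]
  have e11 : F1 N i j i j = 0 := by
    by_cases h : i = 0 ∧ j = 0
    · obtain ⟨h1, h2⟩ := h; subst h1; subst h2; unfold F1
      rw [if_pos (by omega), d00]
    · unfold F1; rw [if_neg (by omega)]
  have s1 : (List.range i).map (fun r => F1 N i j r j) = (List.range i).map (fun r => (d r j).2) := by
    apply List.map_congr_left; intro r hr; unfold F1
    exact if_pos (by have := List.mem_range.mp hr; omega)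
  have s0 : (List.range i).map (fun r => F0 N i j r j) = (List.range i).map (fun r => (d r j).1) := by
    apply List.map_congr_left; intro r hr; unfold F0
    exact if_pos (by have := List.mem_range.mp hr; omega)
  have t1 : (List.range j).map (fun c => F1 N i j i c) = (List.range j).map (fun c => (d i c).2) := by
    apply List.map_congr_left; intro c hc; unfold F1
    exact if_pos (by have := List.mem_range.mp hc; omega)
  have t0 : (List.range j).map (fun c => F0 N i j i c) = (List.range j).map (fun c => (d i c).1) := by
    apply List.map_congr_left; intro c hc; unfold F0
    exact if_pos (by have := List.mem_range.mp hc; omega)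
  rw [e00, e11, s0, s1, t0, t1, Prod.mk.injEq]
  constructor
  · rw [← d_fst]; exact updF0 N i j
  · rw [zero_add, ← d_snd]; exact updF1 N i j

lemma rowA_inv (N i : Nat) (k : Nat) (hk : k ≤ N) :
    (List.range k).foldl (fun st j => cellF i j st) (F0 N i 0, F1 N i 0)
      = (F0 N i k, F1 N i k) := by
  induction k with
  | zero => rfl
  | succ k ih =>
    rw [List.range_succ, List.foldl_append, ih (by omega), List.foldl_cons, List.foldl_nil]
    exact cellF_inv N i k (by omega)

lemma F_iff (N i r c : Nat) :
    ((r < i ∧ c < N) ∨ (r = i ∧ c < N) ∨ (r = 0 ∧ c = 0))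
      ↔ ((r < i + 1 ∧ c < N) ∨ (r = i + 1 ∧ c < 0) ∨ (r = 0 ∧ c = 0)) := by omega

lemma F0_row_succ (N i : Nat) : F0 N i N = F0 N (i + 1) 0 := by
  funext r c; unfold F0; exact if_congr (F_iff N i r c) rfl rfl

lemma F1_row_succ (N i : Nat) : F1 N i N = F1 N (i + 1) 0 := by
  funext r c; unfold F1; exact if_congr (F_iff N i r c) rfl rfl

lemma outerA_inv (N : Nat) (k : Nat) :
    (List.range k).foldl (fun st i => (List.range N).foldl (fun st j => cellF i j st) st)
        (F0 N 0 0, F1 N 0 0)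
      = (F0 N k 0, F1 N k 0) := by
  induction k with
  | zero => rfl
  | succ k ih =>
    rw [List.range_succ, List.foldl_append, ih, List.foldl_cons, List.foldl_nil]
    rw [rowA_inv N k N le_rfl, F0_row_succ, F1_row_succ]

lemma mat_zero (M N : Nat) :
    mat M N (fun _ _ => (0 : Int)) = List.replicate M (List.replicate N 0) := by
  unfold mat
  apply List.ext_getElem
  · simp
  · intro t h1 h2
    simp [List.getElem_replicate]

lemma initA0 (M N : Nat) (hM : 0 < M) (hN : 0 < N) :
    set2 (List.replicate M (List.replicate N 0)) 0 0 1 = mat M N (F0 N 0 0) := by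
  rw [← mat_zero M N, set2_mat M N _ 0 0 hM hN 1]
  apply mat_congr; intro r c _ _
  unfold updA F0
  by_cases h : r = 0 ∧ c = 0
  · obtain ⟨h1, h2⟩ := h; subst h1; subst h2
    rw [if_pos ⟨rfl, rfl⟩, if_pos (by omega), d00]
  · rw [if_neg h, if_neg (by omega)]

lemma initA1 (M N : Nat) (hM : 0 < M) (hN : 0 < N) :
    set2 (List.replicate M (List.replicate N 0)) 0 0 0 = mat M N (F1 N 0 0) := by
  rw [← mat_zero M N, set2_mat M N _ 0 0 hM hN 0]
  apply mat_congr; intro r c _ _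
  unfold updA F1
  by_cases h : r = 0 ∧ c = 0
  · obtain ⟨h1, h2⟩ := h; subst h1; subst h2
    rw [if_pos ⟨rfl, rfl⟩, if_pos (by omega), d00]
  · rw [if_neg h, if_neg (by omega)]

lemma countA_val (m n : Int) (hm : 1 ≤ m) (hn : 1 ≤ n) :
    count m n = (d (m.toNat - 1) (n.toNat - 1)).2 := by
  have hM : 0 < m.toNat := by omega
  have hN : 0 < n.toNat := by omega
  show get2 ((List.range m.toNat).foldl
      (fun st i => (List.range n.toNat).foldl (fun st j => cellA i j st) st)
      (set2 (List.replicate m.toNat (List.replicate n.toNat 0)) 0 0 1,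
       set2 (List.replicate m.toNat (List.replicate n.toNat 0)) 0 0 0)).2
      (m.toNat - 1) (n.toNat - 1) = (d (m.toNat - 1) (n.toNat - 1)).2
  have hinit : (set2 (List.replicate m.toNat (List.replicate n.toNat 0)) 0 0 1,
       set2 (List.replicate m.toNat (List.replicate n.toNat 0)) 0 0 0)
      = matP m.toNat n.toNat (F0 n.toNat 0 0, F1 n.toNat 0 0) := by
    unfold matP
    rw [initA0 m.toNat n.toNat hM hN, initA1 m.toNat n.toNat hM hN]
  rw [hinit]
  rw [foldl_hom_mem (matP m.toNat n.toNat)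
    (fun st i => (List.range n.toNat).foldl (fun st j => cellF i j st) st)
    (fun st i => (List.range n.toNat).foldl (fun st j => cellA i j st) st)
    (List.range m.toNat) _
    (fun a i hi => by
      exact foldl_hom_mem (matP m.toNat n.toNat) (fun st j => cellF i j st)
        (fun st j => cellA i j st) (List.range n.toNat) a
        (fun b j hj => cellA_sim m.toNat n.toNat i j
          (List.mem_range.mp hi) (List.mem_range.mp hj) b))]
  rw [outerA_inv n.toNat m.toNat]
  show get2 (mat m.toNat n.toNat (F1 n.toNat m.toNat 0)) (m.toNat - 1) (n.toNat - 1)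
      = (d (m.toNat - 1) (n.toNat - 1)).2
  rw [get2_mat m.toNat n.toNat _ _ _ (by omega) (by omega)]
  unfold F1
  rw [if_pos (by omega)]

-- function-level model of B's column lists, used only in the proofs below
def cellBF (i : Nat) (st : (Nat → Int) × (Nat → Int) × Int × Int × Int) (j : Nat) :
    (Nat → Int) × (Nat → Int) × Int × Int × Int :=
  let col0 := st.1
  let col1 := st.2.1
  let row0 := st.2.2.1
  let row1 := st.2.2.2.1
  let a := (if i = 0 ∧ j = 0 then (1 : Int) else 0) + col1 j + row1
  let b := col0 j + row0
  ((fun j' => if j' = j then col0 j + a else col0 j'),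
   (fun j' => if j' = j then col1 j + b else col1 j'),
   row0 + a, row1 + b, b)

def rowBF (n : Int) (st : (Nat → Int) × (Nat → Int) × Int) (i : Nat) :
    (Nat → Int) × (Nat → Int) × Int :=
  let fin := (List.range n.toNat).foldl (cellBF i) (st.1, st.2.1, 0, 0, st.2.2)
  (fin.1, fin.2.1, fin.2.2.2.2)

def vec (N : Nat) (f : Nat → Int) : List Int := (List.range N).map f

lemma getD_vec (N : Nat) (f : Nat → Int) (j : Nat) (hj : j < N) :
    (vec N f).getD j 0 = f j := by
  simp [vec, List.getD_eq_getElem?_getD, List.getElem?_map, List.getElem?_range hj]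

lemma set_vec (N : Nat) (f : Nat → Int) (j : Nat) (v : Int) :
    (vec N f).set j v = vec N (fun j' => if j' = j then v else f j') := by
  unfold vec
  apply List.ext_getElem
  · simp
  · intro t h1 h2
    rw [List.getElem_set]
    simp only [List.getElem_map, List.getElem_range, List.length_map,
      List.length_range] at h1 h2 ⊢
    split_ifs with h h' h'
    · rfl
    · omega
    · omega
    · rfl

def vecC (N : Nat) (st : (Nat → Int) × (Nat → Int) × Int × Int × Int) :
    List Int × List Int × Int × Int × Int :=
  (vec N st.1, vec N st.2.1, st.2.2.1, st.2.2.2.1, st.2.2.2.2)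

lemma cellB_sim (N i j : Nat) (hj : j < N) (st : (Nat → Int) × (Nat → Int) × Int × Int × Int) :
    cellB i (vecC N st) j = vecC N (cellBF i st j) := by
  unfold cellB cellBF vecC
  simp only [getD_vec N _ _ hj, set_vec]

def vecR (N : Nat) (st : (Nat → Int) × (Nat → Int) × Int) : List Int × List Int × Int :=
  (vec N st.1, vec N st.2.1, st.2.2)

lemma rowB_sim (n : Int) (i : Nat) (st : (Nat → Int) × (Nat → Int) × Int) :
    rowB n (vecR n.toNat st) i = vecR n.toNat (rowBF n st i) := by
  unfold rowB rowBF vecR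
  have h : (List.range n.toNat).foldl (cellB i) (vec n.toNat st.1, vec n.toNat st.2.1, 0, 0, st.2.2)
      = vecC n.toNat ((List.range n.toNat).foldl (cellBF i) (st.1, st.2.1, 0, 0, st.2.2)) :=
    foldl_hom_mem (vecC n.toNat) (cellBF i) (cellB i) (List.range n.toNat)
      (st.1, st.2.1, 0, 0, st.2.2)
      (fun a j hj => cellB_sim n.toNat i j (List.mem_range.mp hj) a)
  rw [h]
  rfl

-- state of B's column arrays after i full rows
def G0 (N i : Nat) : Nat → Int := fun j' =>
  if j' < N then ((List.range i).map (fun r => (d r j').1)).sum else 0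
def G1 (N i : Nat) : Nat → Int := fun j' =>
  if j' < N then ((List.range i).map (fun r => (d r j').2)).sum else 0

lemma innerB_inv (N i : Nat) (l : Int) (k : Nat) (hk : k ≤ N) :
    (List.range k).foldl (cellBF i) (G0 N i, G1 N i, 0, 0, l)
      = ((fun j' => if j' < k then G0 N i j' + (d i j').1 else G0 N i j'),
         (fun j' => if j' < k then G1 N i j' + (d i j').2 else G1 N i j'),
         ((List.range k).map (fun c => (d i c).1)).sum,
         ((List.range k).map (fun c => (d i c).2)).sum,
         if k = 0 then l else (d i (k - 1)).2) := by
  induction k with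
  | zero =>
    simp only [List.range_zero, List.foldl_nil, List.map_nil, List.sum_nil]
    rw [Prod.mk.injEq, Prod.mk.injEq, Prod.mk.injEq, Prod.mk.injEq]
    refine ⟨?_, ?_, rfl, rfl, rfl⟩ <;> (funext j'; rw [if_neg (by omega)])
  | succ k ih =>
    rw [List.range_succ, List.foldl_append, ih (by omega), List.foldl_cons, List.foldl_nil]
    simp only [cellBF, lt_self_iff_false, if_false]
    have hG1 : G1 N i k = ((List.range i).map (fun r => (d r k).2)).sum := by
      unfold G1; rw [if_pos (by omega)]
    have hG0 : G0 N i k = ((List.range i).map (fun r => (d r k).1)).sum := by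
      unfold G0; rw [if_pos (by omega)]
    have ha : (if i = 0 ∧ k = 0 then (1 : Int) else 0) + G1 N i k
        + ((List.range k).map (fun c => (d i c).2)).sum = (d i k).1 := by
      rw [hG1]; exact (d_fst i k).symm
    have hb : G0 N i k + ((List.range k).map (fun c => (d i c).1)).sum = (d i k).2 := by
      rw [hG0]; exact (d_snd i k).symm
    rw [Prod.mk.injEq, Prod.mk.injEq, Prod.mk.injEq, Prod.mk.injEq]
    refine ⟨?_, ?_, ?_, ?_, ?_⟩
    · funext j'
      by_cases h : j' = k
      · subst h; rw [if_pos rfl, if_pos (Nat.lt_succ_self _), ha]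
      · rw [if_neg h]; exact if_congr (by omega) rfl rfl
    · funext j'
      by_cases h : j' = k
      · subst h; rw [if_pos rfl, if_pos (Nat.lt_succ_self _), hb]
      · rw [if_neg h]; exact if_congr (by omega) rfl rfl
    · rw [List.map_append, List.sum_append, ha]
      simp only [List.map_cons, List.map_nil, List.sum_cons, List.sum_nil, add_zero]
    · rw [List.map_append, List.sum_append, hb]
      simp only [List.map_cons, List.map_nil, List.sum_cons, List.sum_nil, add_zero]
    · rw [hb, if_neg (by omega)]
      norm_num

lemma rowBF_inv (n : Int) (i : Nat) (l : Int) (hn : 1 ≤ n) :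
    rowBF n (G0 n.toNat i, G1 n.toNat i, l) i
      = (G0 n.toNat (i + 1), G1 n.toNat (i + 1), (d i (n.toNat - 1)).2) := by
  unfold rowBF
  rw [innerB_inv n.toNat i l n.toNat le_rfl]
  rw [Prod.mk.injEq, Prod.mk.injEq]
  refine ⟨?_, ?_, ?_⟩
  · funext j'
    unfold G0
    by_cases h : j' < n.toNat
    · simp only [if_pos h]
      rw [List.range_succ, List.map_append, List.sum_append]
      simp only [List.map_cons, List.map_nil, List.sum_cons, List.sum_nil, add_zero]
    · simp only [if_neg h]
  · funext j'
    unfold G1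
    by_cases h : j' < n.toNat
    · simp only [if_pos h]
      rw [List.range_succ, List.map_append, List.sum_append]
      simp only [List.map_cons, List.map_nil, List.sum_cons, List.sum_nil, add_zero]
    · simp only [if_neg h]
  · rw [if_neg (by omega)]

lemma outerB_inv (n : Int) (hn : 1 ≤ n) (k : Nat) :
    (List.range k).foldl (rowBF n) (G0 n.toNat 0, G1 n.toNat 0, 0)
      = (G0 n.toNat k, G1 n.toNat k, if k = 0 then 0 else (d (k - 1) (n.toNat - 1)).2) := by
  induction k with
  | zero => rfl
  | succ k ih =>
    rw [List.range_succ, List.foldl_append, ih, List.foldl_cons, List.foldl_nil]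
    rw [rowBF_inv n k (if k = 0 then 0 else (d (k - 1) (n.toNat - 1)).2) hn]
    rw [if_neg (Nat.succ_ne_zero k)]
    norm_num

lemma countB_val (m n : Int) (hm : 1 ≤ m) (hn : 1 ≤ n) :
    count_alt m n = (d (m.toNat - 1) (n.toNat - 1)).2 := by
  have hz : List.replicate n.toNat (0 : Int) = vec n.toNat (fun _ => 0) := by
    unfold vec
    apply List.ext_getElem
    · simp
    · intro t h1 h2; simp
  show ((List.range m.toNat).foldl (rowB n)
      (List.replicate n.toNat 0, List.replicate n.toNat 0, 0)).2.2
      = (d (m.toNat - 1) (n.toNat - 1)).2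
  rw [hz]
  have hsim : (List.range m.toNat).foldl (rowB n) (vecR n.toNat ((fun _ => 0), (fun _ => 0), 0))
      = vecR n.toNat ((List.range m.toNat).foldl (rowBF n) ((fun _ => 0), (fun _ => 0), 0)) :=
    foldl_hom_mem (vecR n.toNat) (rowBF n) (rowB n) (List.range m.toNat) _
      (fun a i _ => rowB_sim n i a)
  show ((List.range m.toNat).foldl (rowB n) (vecR n.toNat ((fun _ => 0), (fun _ => 0), 0))).2.2
      = (d (m.toNat - 1) (n.toNat - 1)).2
  rw [hsim]
  have i0 : (fun _ => (0 : Int)) = G0 n.toNat 0 := by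
    funext j'; unfold G0; simp
  show ((List.range m.toNat).foldl (rowBF n) ((fun _ => 0), (fun _ => 0), 0)).2.2
      = (d (m.toNat - 1) (n.toNat - 1)).2
  rw [i0]
  have i01 : G0 n.toNat 0 = G1 n.toNat 0 := by funext j'; unfold G0 G1; simp
  nth_rewrite 2 [i01]
  rw [outerB_inv n hn m.toNat]
  show (if m.toNat = 0 then (0 : Int) else (d (m.toNat - 1) (n.toNat - 1)).2)
      = (d (m.toNat - 1) (n.toNat - 1)).2
  rw [if_neg (by omega)]

theorem count_spec : Claim_equal_count := by
  intro m n _ hp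
  unfold Spec_count
  rw [countA_val m n hp.1 hp.2, countB_val m n hp.1 hp.2]
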